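-- pv_equiv track=rewrite | github.com/OmniNode-ai/omnibase_spi | scripts/validation/validate_spi_typing_patterns.py | _is_awaitable_return_type
-- ===== SOURCE A (Python) =====
-- def _is_awaitable_return_type(return_type: str) -> bool:
--     """Check if return type is awaitable."""
--     awaitable_patterns = [
--         "Awaitable",
--         "Coroutine",
--         "Future",
--         "Task",
--         "AsyncGenerator",
--         "AsyncIterator",
--     ]
--     return any(pattern in return_type for pattern in awaitable_patterns)
-- ===== SOURCE B (Python) =====
-- def _is_awaitable_return_type(return_type: str) -> bool:
--     """Check if return type is awaitable: one left-to-right scan over positions,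
--     testing at each position whether any awaitable pattern starts there."""
--     patterns = (
--         "Awaitable",
--         "Coroutine",
--         "Future",
--         "Task",
--         "AsyncGenerator",
--         "AsyncIterator",
--     )
--     for i in range(len(return_type) + 1):
--         tail = return_type[i:]
--         for p in patterns:
--             if tail.startswith(p):
--                 return True
--     return False
-- ===== Notes on version B (the rewrite author's own statement) =====
-- stated objective: alternative
-- what changed: Replaces six independent full substring-containment scans (one per pattern) with a single left-to-right scan over positions that checks at each position whether any of the six patterns starts there (early-returning on the first hit).
import Mathlib
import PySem

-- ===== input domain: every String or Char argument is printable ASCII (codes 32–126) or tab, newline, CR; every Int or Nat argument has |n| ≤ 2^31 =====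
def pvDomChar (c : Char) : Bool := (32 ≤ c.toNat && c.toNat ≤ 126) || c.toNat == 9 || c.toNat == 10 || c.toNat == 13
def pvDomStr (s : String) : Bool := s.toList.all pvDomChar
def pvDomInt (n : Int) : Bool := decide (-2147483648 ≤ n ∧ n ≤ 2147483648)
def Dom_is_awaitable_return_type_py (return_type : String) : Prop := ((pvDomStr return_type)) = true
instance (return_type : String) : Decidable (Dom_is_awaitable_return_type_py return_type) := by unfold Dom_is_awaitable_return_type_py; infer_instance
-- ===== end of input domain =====

-- B replaces six independent substring scans with one position-by-position scan
-- checking each awaitable pattern at each position (alternative decomposition, same cost class).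


-- ===== PORT A =====
-- awaitable_patterns, in A's order
def pvPatternsA : List String :=
  ["Awaitable", "Coroutine", "Future", "Task", "AsyncGenerator", "AsyncIterator"]

-- any(pattern in return_type for pattern in awaitable_patterns)
def is_awaitable_return_type_py (return_type : String) : Bool :=
  pvPatternsA.any (fun pattern => PySem.Str.isIn pattern return_type)

-- ===== PORT B =====
-- patterns tuple of Source B
def pvPatternsB : List String :=
  ["Awaitable", "Coroutine", "Future", "Task", "AsyncGenerator", "AsyncIterator"]

-- for i in range(len(return_type)+1): tail = return_type[i:]; for p in patterns: if tail.startswith(p): return True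
-- (early return = short-circuiting any over the range)
def is_awaitable_return_type_py_alt (return_type : String) : Bool :=
  (PySem.List.pyRange 0 (PySem.Str.len return_type + 1)).any (fun i =>
    pvPatternsB.any (fun p => PySem.Str.startswith (PySem.Str.slice return_type (some i) none) p))

-- ===== PRECONDITION & SPEC =====
def Spec_is_awaitable_return_type_py (return_type : String) (out : Bool) : Prop := out = is_awaitable_return_type_py_alt return_type
instance (return_type : String) (out : Bool) : Decidable (Spec_is_awaitable_return_type_py return_type out) := by unfold Spec_is_awaitable_return_type_py; infer_instance

-- ===== CLAIM (what is proved, stated in full; the proofs are below) =====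
def Claim_equal_is_awaitable_return_type_py : Prop := ∀ (return_type : String), Dom_is_awaitable_return_type_py return_type → Spec_is_awaitable_return_type_py return_type (is_awaitable_return_type_py return_type)

-- ===== LEMMAS AND PROOFS =====

-- infix = prefix at some position of the position scan
lemma infix_iff_exists_pos (p l : List Char) :
    p <:+: l ↔ ∃ i : Int, (0 ≤ i ∧ i < (l.length : Int) + 1) ∧ p <+: l.drop i.toNat := by
  constructor
  · rintro ⟨t, ht, hpre⟩
    rcases List.infix_iff_prefix_suffix.mp ⟨t, ht, hpre⟩ with ⟨u, hpu, hsu⟩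
    refine ⟨(l.length - u.length : Nat), ⟨by positivity, by omega⟩, ?_⟩
    rw [List.suffix_iff_eq_drop.mp hsu] at hpu
    simpa using hpu
  · rintro ⟨i, _, hpre⟩
    exact hpre.isInfix.trans (List.drop_suffix _ _).isInfix

-- the two programs agree on every string
lemma agree (s : String) :
    is_awaitable_return_type_py s = is_awaitable_return_type_py_alt s := by
  rw [Bool.eq_iff_iff]
  simp only [is_awaitable_return_type_py, is_awaitable_return_type_py_alt,
    pvPatternsA, pvPatternsB, List.any_eq_true, PySem.Str.isIn_iff_infix,
    PySem.Str.startswith_eq, PySem.Str.toList_slice, PySem.Chars.startswith_iff,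
    PySem.List.mem_pyRange_one, PySem.Str.len_eq]
  constructor
  · rintro ⟨p, hp, hinf⟩
    rcases (infix_iff_exists_pos p.toList s.toList).mp hinf with ⟨i, hi, hpre⟩
    exact ⟨i, hi, p, hp, by simpa [PySem.Chars.slice, PySem.List.slice_from _ hi.1] using hpre⟩
  · rintro ⟨i, hi, p, hp, hpre⟩
    refine ⟨p, hp, (infix_iff_exists_pos p.toList s.toList).mpr ⟨i, hi, ?_⟩⟩
    simpa [PySem.Chars.slice, PySem.List.slice_from _ hi.1] using hpre

-- ===== VERDICT (by name: the statement is the Claim_ definition above) =====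
theorem is_awaitable_return_type_py_spec : Claim_equal_is_awaitable_return_type_py := by
  intro s _
  unfold Spec_is_awaitable_return_type_py
  exact agree s
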